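-- pv_equiv track=rewrite | github.com/Eric-Wonbin-Sang/AutomatedCourseScheduler | General/Functions.py | string_to_alternating_letter_to_num
-- ===== SOURCE A (Python) =====
-- def string_to_alternating_letter_to_num(some_string):
--     some_string = some_string.replace(" ", "")
--     ret_list = []
--     temp_string = ""
--     is_letter = some_string[0].isalpha()
--     prev_is_letter = is_letter
--     for letter in some_string:
--         temp_string += letter
--         is_letter = letter.isalpha()
--         if is_letter != prev_is_letter:
--             ret_list.append(temp_string[:-1])
--             temp_string = temp_string[-1]
--         prev_is_letter = is_letter
--     ret_list.append(temp_string)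
--     return ret_list
-- ===== SOURCE B (Python) =====
-- def string_to_alternating_letter_to_num(some_string):
--     s = some_string.replace(" ", "")
--     if not s:
--         return []
--     n = len(s)
--     bounds = [0] + [i for i in range(1, n) if s[i].isalpha() != s[i - 1].isalpha()] + [n]
--     return [s[a:b] for a, b in zip(bounds, bounds[1:])]
-- ===== Notes on version B (the rewrite author's own statement) =====
-- stated objective: alternative
-- what changed: Instead of A's single pass with a growing buffer flushed at each letter/non-letter transition, B first computes the list of transition indices (cut positions), then materialises the result in a second stage by slicing the despaced string between consecutive boundaries.
-- outside the precondition, e.g. on string_to_alternating_letter_to_num('  '): A raises IndexError, B returns []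
-- crash fix: On input that is empty or consists only of spaces, A raises IndexError (some_string[0] after removing spaces); B returns []. — e.g. on string_to_alternating_letter_to_num(" "): A raises IndexError, B returns []
import Mathlib
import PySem

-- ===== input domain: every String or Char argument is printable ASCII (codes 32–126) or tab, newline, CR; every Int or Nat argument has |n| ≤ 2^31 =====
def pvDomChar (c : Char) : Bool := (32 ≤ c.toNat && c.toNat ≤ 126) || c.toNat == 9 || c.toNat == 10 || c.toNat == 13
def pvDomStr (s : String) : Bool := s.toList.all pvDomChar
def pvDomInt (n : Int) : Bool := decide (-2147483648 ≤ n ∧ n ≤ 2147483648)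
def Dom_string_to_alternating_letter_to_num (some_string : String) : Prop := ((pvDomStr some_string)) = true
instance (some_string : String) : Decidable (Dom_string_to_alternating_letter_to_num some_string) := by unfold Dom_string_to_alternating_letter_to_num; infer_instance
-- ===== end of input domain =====

-- B replaces A's one-pass buffer-and-flush accumulation by a two-stage boundary computation: collect the
-- letter/non-letter transition indices, then slice the despaced string between consecutive boundaries
-- (alternative decomposition); on empty/all-space input A raises IndexError while B returns [].

-- ===== PORT A =====
-- one loop step: temp_string += letter; is_letter = letter.isalpha(); flush on transition
def pvStepA (st : List (List Char) × List Char × Bool) (letter : Char) : List (List Char) × List Char × Bool :=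
  let temp := st.2.1 ++ [letter]                 -- temp_string += letter
  let isl := PySem.Chars.isalpha letter
  if isl ≠ st.2.2 then
    (st.1 ++ [temp.dropLast], [letter], isl)     -- append temp_string[:-1]; temp_string = temp_string[-1] (= the letter just appended)
  else
    (st.1, temp, isl)

def string_to_alternating_letter_to_num (some_string : String) : List String :=
  let s := PySem.Chars.replace some_string.toList [' '] []      -- some_string.replace(" ", "")
  match PySem.List.pyGet? s 0 with                              -- some_string[0] (IndexError if empty)
  | none => []                                                  -- unreachable under Pre_
  | some c0 =>
    let fin := s.foldl pvStepA ([], [], PySem.Chars.isalpha c0)  -- prev_is_letter starts as some_string[0].isalpha()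
    ((fin.1 ++ [fin.2.1]).map (fun cs => String.ofList cs))          -- ret_list.append(temp_string)

-- ===== PORT B =====
def string_to_alternating_letter_to_num_alt (some_string : String) : List String :=
  let s := PySem.Chars.replace some_string.toList [' '] []      -- s = some_string.replace(" ", "")
  if s.isEmpty then []                                          -- if not s: return []
  else
    -- bounds = [0] + [i for i in range(1, n) if s[i].isalpha() != s[i-1].isalpha()] + [n]
    let bounds : List Int :=
      0 :: ((PySem.List.pyRange 1 (s.length : Int) 1).filter (fun i =>
        ((PySem.List.pyGet? s i).map PySem.Chars.isalpha) !=
        ((PySem.List.pyGet? s (i - 1)).map PySem.Chars.isalpha)) ++ [(s.length : Int)])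
    -- [s[a:b] for a, b in zip(bounds, bounds[1:])]
    (bounds.zip bounds.tail).map (fun p => String.ofList (PySem.List.slice s (some p.1) (some p.2)))

-- ===== PRECONDITION & SPEC =====
-- Pre_ excludes exactly the inputs where A raises IndexError at some_string[0]: strings with no non-space character.
def Pre_string_to_alternating_letter_to_num (some_string : String) : Prop :=
  some_string.toList.filter (fun c => c ≠ ' ') ≠ []
instance (some_string : String) : Decidable (Pre_string_to_alternating_letter_to_num some_string) := by unfold Pre_string_to_alternating_letter_to_num; infer_instance
def pvWitness_string_to_alternating_letter_to_num : String := "ab1"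

-- On input that is empty or consists only of spaces, A raises IndexError (some_string[0] after removing spaces); B returns [].
def Raises_string_to_alternating_letter_to_num (some_string : String) : Prop :=
  some_string.toList.filter (fun c => c ≠ ' ') = []
instance (some_string : String) : Decidable (Raises_string_to_alternating_letter_to_num some_string) := by unfold Raises_string_to_alternating_letter_to_num; infer_instance
def pvRaiseWitness_string_to_alternating_letter_to_num : String := "  "
def pvRaiseWitnessOut_string_to_alternating_letter_to_num : List String := []

def Spec_string_to_alternating_letter_to_num (some_string : String) (out : List String) : Prop := out = string_to_alternating_letter_to_num_alt some_string
instance (some_string : String) (out : List String) : Decidable (Spec_string_to_alternating_letter_to_num some_string out) := by unfold Spec_string_to_alternating_letter_to_num; infer_instance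

-- ===== CLAIM (what is proved, stated in full; the proofs are below) =====
def Claim_equal_string_to_alternating_letter_to_num : Prop := ∀ (some_string : String), Dom_string_to_alternating_letter_to_num some_string → Pre_string_to_alternating_letter_to_num some_string → Spec_string_to_alternating_letter_to_num some_string (string_to_alternating_letter_to_num some_string)
def Claim_raises_string_to_alternating_letter_to_num : Prop := (∀ (some_string : String), Dom_string_to_alternating_letter_to_num some_string → Raises_string_to_alternating_letter_to_num some_string → ¬ Pre_string_to_alternating_letter_to_num some_string) ∧ (Dom_string_to_alternating_letter_to_num (pvRaiseWitness_string_to_alternating_letter_to_num) ∧ Raises_string_to_alternating_letter_to_num (pvRaiseWitness_string_to_alternating_letter_to_num) ∧ string_to_alternating_letter_to_num_alt (pvRaiseWitness_string_to_alternating_letter_to_num) = pvRaiseWitnessOut_string_to_alternating_letter_to_num)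

-- ===== LEMMAS AND PROOFS =====

-- same isalpha-class as c
def pvSame (c : Char) : Char → Bool := fun d => PySem.Chars.isalpha d == PySem.Chars.isalpha c

-- the common intermediate: maximal runs of equal isalpha, front to back
def pvRuns (l : List Char) : List (List Char) :=
  match l with
  | [] => []
  | c :: cs => (c :: cs.takeWhile (pvSame c)) :: pvRuns (cs.dropWhile (pvSame c))
termination_by l.length
decreasing_by
  simp only [List.length_cons]
  exact Nat.lt_succ_of_le (List.Sublist.length_le (List.dropWhile_sublist _))

theorem pvRuns_nil : pvRuns [] = [] := by rw [pvRuns.eq_def]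

theorem pvRuns_cons_def (c : Char) (cs : List Char) :
    pvRuns (c :: cs) = (c :: cs.takeWhile (pvSame c)) :: pvRuns (cs.dropWhile (pvSame c)) := by
  rw [pvRuns.eq_def]

-- replace(" ", "") on a list of chars is exactly "drop all spaces"
theorem pvReplaceGo_filter (fuel : Nat) : ∀ (l acc : List Char), l.length ≤ fuel →
    PySem.Chars.replace.go [' '] [] fuel l acc = acc.reverse ++ l.filter (fun c => c ≠ ' ') := by
  induction fuel with
  | zero =>
    intro l acc h
    have : l = [] := List.length_eq_zero_iff.mp (Nat.le_zero.mp h)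
    subst this
    simp [PySem.Chars.replace.go]
  | succ n ih =>
    intro l acc h
    match l with
    | [] => simp [PySem.Chars.replace.go]
    | c :: t =>
      by_cases hc : c = ' '
      · subst hc
        have hpre : List.isPrefixOf [' '] (' ' :: t) = true := by simp [List.isPrefixOf]
        simp only [PySem.Chars.replace.go, hpre, if_true]
        simp only [List.reverse_nil, List.nil_append, List.length_cons, List.length_nil,
          List.drop_succ_cons, List.drop_zero]
        rw [ih t acc (by simpa using Nat.le_of_succ_le_succ h)]
        simp
      · have hpre : List.isPrefixOf [' '] (c :: t) = false := by
          simp [List.isPrefixOf]; exact fun h' => hc h'.symm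
        simp only [PySem.Chars.replace.go, hpre, Bool.false_eq_true, if_false]
        rw [ih t (c :: acc) (by simpa using Nat.le_of_succ_le_succ h)]
        simp [hc]

theorem pvReplace_filter (l : List Char) :
    PySem.Chars.replace l [' '] [] = l.filter (fun c => c ≠ ' ') := by
  rw [PySem.Chars.replace]
  simp only [List.isEmpty_cons, Bool.false_eq_true, if_false]
  exact pvReplaceGo_filter l.length l [] le_rfl

-- ---- A-side: the fold computes pvRuns ----

-- merge a pending run whose isalpha-class is b in front of a run list
def pvPrepend (b : Bool) (temp : List Char) (rs : List (List Char)) : List (List Char) :=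
  match rs with
  | [] => [temp]
  | g :: gs => if g.head?.map PySem.Chars.isalpha == some b then (temp ++ g) :: gs else temp :: g :: gs

theorem pvRuns_cons (c : Char) (l : List Char) :
    pvRuns (c :: l) = pvPrepend (PySem.Chars.isalpha c) [c] (pvRuns l) := by
  match l with
  | [] => simp [pvRuns_cons_def, pvRuns_nil, pvPrepend]
  | d :: ds =>
    by_cases hd : PySem.Chars.isalpha d = PySem.Chars.isalpha c
    · have hfun : pvSame d = pvSame c := by funext e; simp [pvSame, hd]
      rw [pvRuns_cons_def, pvRuns_cons_def]
      simp only [List.takeWhile_cons, List.dropWhile_cons, pvSame, hd, beq_self_eq_true, if_true,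
        hfun, pvPrepend, List.head?_cons, Option.map_some]
      simp
    · rw [pvRuns_cons_def]
      simp only [List.takeWhile_cons, List.dropWhile_cons]
      rw [show pvSame c d = false by simpa [pvSame] using hd]
      simp only [Bool.false_eq_true, if_false]
      rw [pvRuns_cons_def]
      simp only [pvPrepend, List.head?_cons, Option.map_some]
      rw [if_neg (by simp [hd])]

-- merging [c] and then temp (different class) = temp becomes its own run
theorem pvPrepend_ne (b : Bool) (temp : List Char) (c : Char) (rs : List (List Char))
    (h : PySem.Chars.isalpha c ≠ b) :
    pvPrepend b temp (pvPrepend (PySem.Chars.isalpha c) [c] rs)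
      = temp :: pvPrepend (PySem.Chars.isalpha c) [c] rs := by
  match rs with
  | [] => simp [pvPrepend, h]
  | g :: gs =>
    by_cases hg : g.head?.map PySem.Chars.isalpha == some (PySem.Chars.isalpha c)
    · simp [pvPrepend, hg, h]
    · simp only [pvPrepend]
      rw [if_neg (by simpa using hg)]
      simp [h]

-- merging [c] and then temp (same class) = merging temp ++ [c]
theorem pvPrepend_eq (temp : List Char) (c : Char) (rs : List (List Char)) :
    pvPrepend (PySem.Chars.isalpha c) temp (pvPrepend (PySem.Chars.isalpha c) [c] rs)
      = pvPrepend (PySem.Chars.isalpha c) (temp ++ [c]) rs := by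
  match rs with
  | [] => simp [pvPrepend]
  | g :: gs =>
    by_cases hg : g.head?.map PySem.Chars.isalpha == some (PySem.Chars.isalpha c)
    · simp [pvPrepend, hg]
    · simp only [pvPrepend]
      rw [if_neg (by simpa using hg), if_neg (by simpa using hg)]
      simp

-- loop invariant: A's fold, finished by the final append, is the runs emitted so far
-- followed by the pending run merged into the runs of the remaining characters
theorem pvLoop (l : List Char) : ∀ (ret : List (List Char)) (temp : List Char) (b : Bool),
    (l.foldl pvStepA (ret, temp, b)).1 ++ [(l.foldl pvStepA (ret, temp, b)).2.1] =
      ret ++ pvPrepend b temp (pvRuns l) := by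
  induction l with
  | nil => intro ret temp b; simp [pvRuns_nil, pvPrepend]
  | cons c cs ih =>
    intro ret temp b
    simp only [List.foldl_cons]
    by_cases hc : PySem.Chars.isalpha c = b
    · rw [show pvStepA (ret, temp, b) c = (ret, temp ++ [c], b) by simp [pvStepA, hc]]
      rw [ih ret (temp ++ [c]) b, pvRuns_cons]
      rw [← hc, pvPrepend_eq]
    · rw [show pvStepA (ret, temp, b) c = (ret ++ [temp], [c], PySem.Chars.isalpha c) by
        simp [pvStepA, hc]]
      rw [ih (ret ++ [temp]) [c] (PySem.Chars.isalpha c), pvRuns_cons,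
        pvPrepend_ne b temp c _ hc]
      simp

-- prepending an empty pending run of the head's class is the identity on the runs of c :: l
theorem pvPrepend_nil (c : Char) (l : List Char) :
    pvPrepend (PySem.Chars.isalpha c) [] (pvRuns (c :: l)) = pvRuns (c :: l) := by
  rw [pvRuns_cons_def]
  simp [pvPrepend]

-- ---- B-side: boundary slicing computes pvRuns ----

def pvCut (s : List Char) (i : Int) : Bool :=
  ((PySem.List.pyGet? s i).map PySem.Chars.isalpha) !=
  ((PySem.List.pyGet? s (i - 1)).map PySem.Chars.isalpha)

def pvCuts (s : List Char) : List Int :=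
  (PySem.List.pyRange 1 (s.length : Int) 1).filter (pvCut s)

def pvBounds (s : List Char) : List Int := 0 :: (pvCuts s ++ [(s.length : Int)])

def pvSlices (s : List Char) : List String :=
  ((pvBounds s).zip (pvBounds s).tail).map
    (fun p => String.ofList (PySem.List.slice s (some p.1) (some p.2)))

theorem pvAlt_eq_slices (some_string : String) :
    string_to_alternating_letter_to_num_alt some_string =
      (if (PySem.Chars.replace some_string.toList [' '] []).isEmpty then []
       else pvSlices (PySem.Chars.replace some_string.toList [' '] [])) := rfl

-- every char of a run has the head's isalpha-class
theorem pvRun_class (c : Char) (cs : List Char) :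
    ∀ x ∈ c :: cs.takeWhile (pvSame c), PySem.Chars.isalpha x = PySem.Chars.isalpha c := by
  intro x hx
  rcases List.mem_cons.mp hx with h | h
  · subst h; rfl
  · simpa [pvSame] using List.mem_takeWhile_imp h

theorem pvGet_run (run d : List Char) (j : Nat) (hj : j < run.length) :
    PySem.List.pyGet? (run ++ d) ((j : Nat) : Int) = some run[j] := by
  rw [PySem.List.pyGet?_natCast, List.getElem?_append_left hj, List.getElem?_eq_getElem hj]

theorem pvGet_suffix (run d : List Char) (j : Nat) :
    PySem.List.pyGet? (run ++ d) ((run.length : Int) + (j : Int)) = d[j]? := by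
  rw [show (run.length : Int) + (j : Int) = ((run.length + j : Nat) : Int) by push_cast; ring,
    PySem.List.pyGet?_natCast, List.getElem?_append_right (by omega)]
  congr 1
  omega

-- no cut strictly inside the first run
theorem pvCut_run_false (c : Char) (cs d : List Char) (i : Int)
    (h1 : 1 ≤ i) (h2 : i < ((c :: cs.takeWhile (pvSame c)).length : Int)) :
    pvCut ((c :: cs.takeWhile (pvSame c)) ++ d) i = false := by
  set run := c :: cs.takeWhile (pvSame c) with hrun
  have hj : i.toNat < run.length := by omega
  have hj1 : i.toNat - 1 < run.length := by omega
  have g1 : PySem.List.pyGet? (run ++ d) i = some run[i.toNat] := by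
    have h := pvGet_run run d i.toNat hj
    rwa [show ((i.toNat : Nat) : Int) = i by omega] at h
  have g2 : PySem.List.pyGet? (run ++ d) (i - 1) = some run[i.toNat - 1] := by
    have h := pvGet_run run d (i.toNat - 1) hj1
    rwa [show ((i.toNat - 1 : Nat) : Int) = i - 1 by omega] at h
  unfold pvCut
  rw [g1, g2]
  have e1 : PySem.Chars.isalpha run[i.toNat] = PySem.Chars.isalpha c :=
    pvRun_class c cs _ (by rw [hrun] at *; exact List.getElem_mem hj)
  have e2 : PySem.Chars.isalpha run[i.toNat - 1] = PySem.Chars.isalpha c :=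
    pvRun_class c cs _ (by rw [hrun] at *; exact List.getElem_mem hj1)
  simp [e1, e2]

-- there is a cut exactly at the end of the first run
theorem pvCut_boundary (c : Char) (cs : List Char) (g : Char) (gs : List Char)
    (hd : cs.dropWhile (pvSame c) = g :: gs) :
    pvCut ((c :: cs.takeWhile (pvSame c)) ++ (g :: gs))
      ((c :: cs.takeWhile (pvSame c)).length : Int) = true := by
  set run := c :: cs.takeWhile (pvSame c) with hrun
  have hg : pvSame c g = false := by
    have h := List.head?_dropWhile_not (pvSame c) cs
    rw [hd] at h; simpa using h
  have hpos : 0 < run.length := by rw [hrun]; simp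
  have hlast : run.length - 1 < run.length := by omega
  unfold pvCut
  have e0 : PySem.List.pyGet? (run ++ g :: gs) ((run.length : Int)) = some g := by
    have h := pvGet_suffix run (g :: gs) 0
    simpa using h
  rw [e0, show (run.length : Int) - 1 = ((run.length - 1 : Nat) : Int) by omega,
    pvGet_run run _ _ hlast]
  have e2 : PySem.Chars.isalpha run[run.length - 1] = PySem.Chars.isalpha c :=
    pvRun_class c cs _ (by rw [hrun] at *; exact List.getElem_mem hlast)
  have hne : PySem.Chars.isalpha g ≠ PySem.Chars.isalpha c := by
    intro h; rw [pvSame] at hg; simp [h] at hg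
  simp [e2, hne]

-- cuts in the suffix are the suffix's cuts, shifted
theorem pvCut_shift (run d : List Char) (j : Int) (hj : 1 ≤ j) :
    pvCut (run ++ d) (j + (run.length : Int)) = pvCut d j := by
  have g1 : PySem.List.pyGet? d j = d[j.toNat]? := by
    have h := PySem.List.pyGet?_natCast d j.toNat
    rwa [show ((j.toNat : Nat) : Int) = j by omega] at h
  have g2 : PySem.List.pyGet? d (j - 1) = d[j.toNat - 1]? := by
    have h := PySem.List.pyGet?_natCast d (j.toNat - 1)
    rwa [show ((j.toNat - 1 : Nat) : Int) = j - 1 by omega] at h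
  unfold pvCut
  rw [show j + (run.length : Int) - 1 = (run.length : Int) + ((j.toNat - 1 : Nat) : Int) by omega,
    show j + (run.length : Int) = (run.length : Int) + ((j.toNat : Nat) : Int) by omega,
    pvGet_suffix, pvGet_suffix, g1, g2]

theorem pvCuts_decomp_nil (c : Char) (cs : List Char) (hd : cs.dropWhile (pvSame c) = []) :
    pvCuts (c :: cs) = [] := by
  have hcs : cs.takeWhile (pvSame c) = cs := by
    have h := List.takeWhile_append_dropWhile (p := pvSame c) (l := cs)
    rw [hd] at h; simpa using h
  apply List.filter_eq_nil_iff.mpr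
  intro i hi
  rw [PySem.List.mem_pyRange_one] at hi
  have h := pvCut_run_false c cs [] i hi.1 (by rw [hcs]; exact_mod_cast hi.2)
  rw [hcs] at h
  simp only [List.append_nil] at h
  simp [h]

theorem pvCuts_decomp_cons (c : Char) (cs : List Char) (g : Char) (gs : List Char)
    (hd : cs.dropWhile (pvSame c) = g :: gs) :
    pvCuts (c :: cs) = ((c :: cs.takeWhile (pvSame c)).length : Int) ::
      (pvCuts (g :: gs)).map (fun x => x + ((c :: cs.takeWhile (pvSame c)).length : Int)) := by
  set run := c :: cs.takeWhile (pvSame c) with hrun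
  have hsplit : c :: cs = run ++ (g :: gs) := by
    rw [hrun, ← hd]; simp
  have hpos : 0 < run.length := by rw [hrun]; simp
  have hlen : (c :: cs).length = run.length + (g :: gs).length := by rw [hsplit]; simp
  unfold pvCuts
  rw [hsplit]
  have hkn : (run.length : Int) < ((run ++ g :: gs).length : Int) := by
    push_cast [List.length_append]; simp
  rw [PySem.List.pyRange_one_append 1 (run.length : Int) _ (by exact_mod_cast hpos) (by omega),
    List.filter_append]
  have hfa : (PySem.List.pyRange 1 (run.length : Int) 1).filter (pvCut (run ++ g :: gs)) = [] := by
    apply List.filter_eq_nil_iff.mpr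
    intro i hi
    rw [PySem.List.mem_pyRange_one] at hi
    have h := pvCut_run_false c cs (g :: gs) i hi.1 (by rw [← hrun]; exact hi.2)
    rw [← hrun] at h
    simp [h]
  rw [hfa, PySem.List.pyRange_one_cons hkn, List.filter_cons,
    pvCut_boundary c cs g gs hd]
  have hrange : PySem.List.pyRange ((run.length : Int) + 1) ((run ++ g :: gs).length : Int) 1
      = (PySem.List.pyRange 1 ((g :: gs).length : Int) 1).map (fun x => x + (run.length : Int)) := by
    rw [PySem.List.pyRange_one, PySem.List.pyRange_one, List.map_map]
    rw [show (((run ++ g :: gs).length : Int) - ((run.length : Int) + 1)).toNat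
        = (((g :: gs).length : Int) - 1).toNat by
      push_cast [List.length_append]; omega]
    apply List.map_congr_left
    intro a _
    simp
    ring
  rw [hrange, List.filter_map]
  have hfc : (PySem.List.pyRange 1 ((g :: gs).length : Int) 1).filter
        ((pvCut (run ++ g :: gs)) ∘ (fun x => x + (run.length : Int)))
      = (PySem.List.pyRange 1 ((g :: gs).length : Int) 1).filter (pvCut (g :: gs)) := by
    apply List.filter_congr
    intro x hx
    rw [PySem.List.mem_pyRange_one] at hx
    exact pvCut_shift run (g :: gs) x hx.1
  rw [hfc]
  simp

theorem pvBounds_nonneg (s : List Char) : ∀ x ∈ pvBounds s, 0 ≤ x := by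
  intro x hx
  rcases List.mem_cons.mp hx with h | h
  · omega
  rcases List.mem_append.mp h with h | h
  · have hm := (List.mem_filter.mp h).1
    rw [PySem.List.mem_pyRange_one] at hm
    omega
  · simp only [List.mem_singleton] at h
    subst h
    positivity

theorem pvSlice_shift (run d : List Char) (a b : Int) (ha : 0 ≤ a) (hb : 0 ≤ b) :
    PySem.List.slice (run ++ d) (some (a + (run.length : Int))) (some (b + (run.length : Int))) =
      PySem.List.slice d (some a) (some b) := by
  rw [PySem.List.slice_toNat _ (by omega) (by omega), PySem.List.slice_toNat _ ha hb,
    Int.toNat_add ha (by omega), Int.toNat_add hb (by omega)]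
  simp only [Int.toNat_natCast]
  rw [List.drop_append]
  rw [List.drop_eq_nil_of_le (by omega), show a.toNat + run.length - run.length = a.toNat by omega,
    show b.toNat + run.length - (a.toNat + run.length) = b.toNat - a.toNat by omega]
  simp

theorem pvSlice_first (run d : List Char) :
    PySem.List.slice (run ++ d) (some 0) (some (run.length : Int)) = run := by
  rw [PySem.List.slice_toNat _ le_rfl (by positivity)]
  simp

theorem pvZipShift (k : Int) (w : List Int) :
    (((0:Int) :: (List.map (fun x => x + k) ((0:Int) :: w))).zip
        (List.map (fun x => x + k) ((0:Int) :: w)))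
      = ((0:Int), k) :: (((0:Int) :: w).zip w).map
          (Prod.map (fun x => x + k) (fun x => x + k)) := by
  simp only [List.map_cons, List.zip_cons_cons, zero_add]
  rw [show (k :: List.map (fun x => x + k) w) = List.map (fun x => x + k) ((0:Int) :: w) by
    simp, List.zip_map]

theorem pvSlices_eq_runs_aux : ∀ (n : Nat) (l : List Char), l.length ≤ n → l ≠ [] →
    pvSlices l = (pvRuns l).map (fun cs => String.ofList cs) := by
  intro n
  induction n with
  | zero =>
    intro l hl hne
    cases l with
    | nil => exact absurd rfl hne
    | cons c cs => simp at hl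
  | succ m ih =>
    intro l hl hne
    obtain ⟨c, cs, rfl⟩ := List.exists_cons_of_ne_nil hne
    cases hdd : cs.dropWhile (pvSame c) with
    | nil =>
      have hcs : cs.takeWhile (pvSame c) = cs := by
        have h := List.takeWhile_append_dropWhile (p := pvSame c) (l := cs)
        rw [hdd] at h; simpa using h
      unfold pvSlices pvBounds
      rw [pvCuts_decomp_nil c cs hdd]
      rw [pvRuns_cons_def, hdd, pvRuns_nil, hcs]
      simp only [List.nil_append, List.tail_cons, List.zip_cons_cons, List.zip_nil_right,
        List.map_cons, List.map_nil]
      rw [show (((c :: cs).length : Nat) : Int) = (((cs.length + 1 : Nat)) : Int) by simp]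
      have hsl : PySem.List.slice (c :: cs) (some 0) (some ((cs.length + 1 : Nat) : Int))
          = c :: cs := by
        rw [PySem.List.slice_toNat _ le_rfl (by positivity)]
        simp [List.take_of_length_le]
      rw [hsl]
    | cons g gs =>
      set run := c :: cs.takeWhile (pvSame c) with hrun
      have hsplit : c :: cs = run ++ (g :: gs) := by
        rw [hrun, ← hdd]; simp
      have hpos : 0 < run.length := by rw [hrun]; simp
      have hlen : (c :: cs).length = run.length + (g :: gs).length := by rw [hsplit]; simp
      have hlt : (g :: gs).length ≤ m := by
        have h1 : (c :: cs).length ≤ m + 1 := hl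
        omega
      have ihd := ih (g :: gs) hlt (by simp)
      have hbounds : pvBounds (c :: cs)
          = 0 :: (pvBounds (g :: gs)).map (fun x => x + (run.length : Int)) := by
        unfold pvBounds
        rw [pvCuts_decomp_cons c cs g gs hdd, ← hrun]
        rw [show (((c :: cs).length : Nat) : Int)
            = (((g :: gs).length : Nat) : Int) + ((run.length : Nat) : Int) by omega]
        simp
      unfold pvSlices
      rw [hbounds]
      have hBd : pvBounds (g :: gs)
          = 0 :: (pvCuts (g :: gs) ++ [(((g :: gs).length : Nat) : Int)]) := rfl
      rw [hBd, List.tail_cons, pvZipShift, List.map_cons, List.map_map]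
      have hfirst : PySem.List.slice (c :: cs) (some 0) (some (run.length : Int)) = run := by
        rw [hsplit]; exact pvSlice_first run (g :: gs)
      have htail : List.map
            ((fun p : Int × Int => String.ofList (PySem.List.slice (c :: cs) (some p.1) (some p.2)))
              ∘ Prod.map (fun x => x + (run.length : Int)) (fun x => x + (run.length : Int)))
            ((0 :: (pvCuts (g :: gs) ++ [(((g :: gs).length : Nat) : Int)])).zip
              (pvCuts (g :: gs) ++ [(((g :: gs).length : Nat) : Int)]))
          = List.map (fun p : Int × Int => String.ofList (PySem.List.slice (g :: gs) (some p.1) (some p.2)))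
            ((0 :: (pvCuts (g :: gs) ++ [(((g :: gs).length : Nat) : Int)])).zip
              (pvCuts (g :: gs) ++ [(((g :: gs).length : Nat) : Int)])) := by
        apply List.map_congr_left
        intro p hp
        obtain ⟨h1, h2⟩ := List.of_mem_zip hp
        have ha : 0 ≤ p.1 := pvBounds_nonneg (g :: gs) p.1 (by rw [hBd]; exact h1)
        have hb2 : 0 ≤ p.2 := pvBounds_nonneg (g :: gs) p.2 (by rw [hBd]; exact List.mem_cons_of_mem _ h2)
        simp only [Function.comp, Prod.map]
        rw [hsplit, pvSlice_shift run (g :: gs) p.1 p.2 ha hb2]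
      rw [htail]
      have hfst : String.ofList (PySem.List.slice (c :: cs)
            (some ((0:Int), (run.length : Int)).1) (some ((0:Int), (run.length : Int)).2))
          = String.ofList run := by
        simp only []
        rw [hfirst]
      rw [hfst]
      have hruns : pvRuns (c :: cs) = run :: pvRuns (g :: gs) := by
        rw [pvRuns_cons_def, hdd, hrun]
      rw [hruns]
      have hps : List.map (fun p : Int × Int =>
            String.ofList (PySem.List.slice (g :: gs) (some p.1) (some p.2)))
            ((0 :: (pvCuts (g :: gs) ++ [(((g :: gs).length : Nat) : Int)])).zip
              (pvCuts (g :: gs) ++ [(((g :: gs).length : Nat) : Int)]))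
          = pvSlices (g :: gs) := by
        unfold pvSlices
        rw [hBd, List.tail_cons]
      rw [hps, ihd]
      simp

theorem pvSlices_eq_runs (l : List Char) (h : l ≠ []) :
    pvSlices l = (pvRuns l).map (fun cs => String.ofList cs) :=
  pvSlices_eq_runs_aux l.length l le_rfl h

-- ===== VERDICT (by name: the statement is the Claim_ definition above) =====
theorem string_to_alternating_letter_to_num_spec : Claim_equal_string_to_alternating_letter_to_num := by
  intro s _ hpre
  unfold Spec_string_to_alternating_letter_to_num
  rw [pvAlt_eq_slices]
  unfold string_to_alternating_letter_to_num
  simp only [pvReplace_filter]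
  have hpre' : s.toList.filter (fun c => c ≠ ' ') ≠ [] := hpre
  obtain ⟨c0, rest, heq⟩ := List.exists_cons_of_ne_nil hpre'
  rw [heq]
  have hget : PySem.List.pyGet? (c0 :: rest) (0 : Int) = some c0 := by
    simp [PySem.List.pyGet?, PySem.List.pyIdx?]
  rw [hget]
  rw [if_neg (by simp)]
  rw [pvSlices_eq_runs (c0 :: rest) (by simp)]
  show List.map (fun cs => String.ofList cs)
      ((List.foldl pvStepA ([], [], PySem.Chars.isalpha c0) (c0 :: rest)).1 ++
        [(List.foldl pvStepA ([], [], PySem.Chars.isalpha c0) (c0 :: rest)).2.1])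
      = List.map (fun cs => String.ofList cs) (pvRuns (c0 :: rest))
  rw [pvLoop (c0 :: rest) [] [] (PySem.Chars.isalpha c0)]
  rw [pvPrepend_nil c0 rest]
  simp

def string_to_alternating_letter_to_num_raises : Claim_raises_string_to_alternating_letter_to_num := by
  unfold Claim_raises_string_to_alternating_letter_to_num
  refine ⟨fun s _ h hp => hp h, by decide, by decide, by decide⟩
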